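-- pv_equiv track=rewrite | github.com/iemran93/aoc-2024 | d1/main.py | part2
-- ===== SOURCE A (Python) =====
-- def part2(rside, lside):
--     total = 0
--     seen = {}
--     for i in rside:
--         if i in seen.keys():
--             total += seen[i]
--             continue
--         count = 0
--         for j in lside:
--             if i == j:
--                 count += 1
--         seen[i] = i * count
--         total += seen[i]
--     return total
-- ===== SOURCE B (Python) =====
-- def part2(rside, lside):
--     # Build frequency tables of both sides, then sum over the DISTINCT values of rside.
--     cl = {}
--     for j in lside:
--         cl[j] = cl.get(j, 0) + 1
--     cr = {}
--     for i in rside: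
--         cr[i] = cr.get(i, 0) + 1
--     return sum(v * c * cl.get(v, 0) for v, c in cr.items())
-- ===== Notes on version B (the rewrite author's own statement) =====
-- stated objective: faster
-- what changed: Replaces A's per-element pass over rside with a memoized inner scan of lside by two frequency tables built in one pass each, summing v * count_r(v) * count_l(v) over the distinct values of rside.
import Mathlib
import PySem

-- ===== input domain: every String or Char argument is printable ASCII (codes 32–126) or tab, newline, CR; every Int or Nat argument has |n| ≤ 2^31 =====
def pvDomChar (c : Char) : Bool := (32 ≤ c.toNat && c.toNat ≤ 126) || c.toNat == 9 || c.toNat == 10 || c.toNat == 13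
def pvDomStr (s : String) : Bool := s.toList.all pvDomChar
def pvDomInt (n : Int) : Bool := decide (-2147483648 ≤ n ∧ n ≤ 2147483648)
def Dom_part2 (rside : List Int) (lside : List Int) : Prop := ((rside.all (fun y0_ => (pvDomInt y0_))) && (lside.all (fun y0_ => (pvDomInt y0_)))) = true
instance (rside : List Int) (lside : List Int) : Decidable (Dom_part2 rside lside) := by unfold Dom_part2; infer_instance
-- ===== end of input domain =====

-- B replaces A's per-element pass (with a memoized inner scan of lside) by two frequency
-- tables and a sum over the distinct values of rside; objective: faster.

-- ===== PORT A =====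
-- one loop iteration of A: on a seen value add the memoized product, otherwise count i in lside
def stepA (lside : List Int) (st : Int × PySem.Dict Int Int) (i : Int) : Int × PySem.Dict Int Int :=
  if st.2.contains i then
    (st.1 + st.2.getD i 0, st.2)
  else
    let count : Int := lside.foldl (fun c j => if i == j then c + 1 else c) 0
    (st.1 + i * count, st.2.insert i (i * count))

def part2 (rside : List Int) (lside : List Int) : Int :=
  (rside.foldl (stepA lside) (0, PySem.Dict.empty)).1

-- ===== PORT B =====
def part2_alt (rside : List Int) (lside : List Int) : Int :=
  ((rside.foldl (fun d x => d.insert x (d.getD x 0 + 1)) PySem.Dict.empty).items.map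
    (fun p => p.1 * p.2 *
      (lside.foldl (fun d x => d.insert x (d.getD x 0 + 1)) PySem.Dict.empty).getD p.1 0)).sum

-- ===== PRECONDITION & SPEC =====
def Spec_part2 (rside : List Int) (lside : List Int) (out : Int) : Prop := out = part2_alt rside lside
instance (rside : List Int) (lside : List Int) (out : Int) : Decidable (Spec_part2 rside lside out) := by unfold Spec_part2; infer_instance

-- ===== CLAIM (what is proved, stated in full; the proofs are below) =====
def Claim_equal_part2 : Prop := ∀ (rside : List Int) (lside : List Int), Dom_part2 rside lside → Spec_part2 rside lside (part2 rside lside)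

-- ===== LEMMAS AND PROOFS =====

-- A's inner loop counts occurrences of i in lside
lemma stepA_count (lside : List Int) (i : Int) :
    lside.foldl (fun c j => if i == j then c + 1 else c) 0 = (lside.count i : Int) := by
  rw [PySem.List.foldl_count_if (fun j => i == j) lside 0]
  simp only [List.count, zero_add, Nat.cast_inj]
  refine List.countP_congr (fun a _ => ?_)
  by_cases hia : i = a
  · subst hia; rfl
  · have hai : ¬ a = i := fun e => hia e.symm
    simp [hia, hai]

-- loop invariant for A: total accumulates i * count(i in lside) per element of rside
lemma foldA_fst (lside : List Int) (rs : List Int) :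
    ∀ (t : Int) (d : PySem.Dict Int Int),
      (∀ k, d.contains k = true → d.getD k 0 = k * (lside.count k : Int)) →
      (rs.foldl (stepA lside) (t, d)).1
        = t + (rs.map (fun i => i * (lside.count i : Int))).sum := by
  induction rs with
  | nil => intro t d _; simp
  | cons i rs ih =>
    intro t d h
    simp only [List.foldl_cons, List.map_cons, List.sum_cons]
    by_cases hc : d.contains i = true
    · rw [show stepA lside (t, d) i = (t + d.getD i 0, d) by simp only [stepA, if_pos hc]]
      rw [ih _ _ h, h i hc]; ring
    · rw [show stepA lside (t, d) i
            = (t + i * (lside.count i : Int), d.insert i (i * (lside.count i : Int))) by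
          simp only [stepA, if_neg hc, stepA_count]]
      rw [ih]
      · ring
      · intro k hk
        by_cases hki : k = i
        · subst hki; rw [PySem.Dict.getD_insert, if_pos rfl]
        · rw [PySem.Dict.getD_insert, if_neg hki]
          apply h
          rw [PySem.Dict.contains_insert] at hk
          simpa [hki] using hk

-- grouping: summing f over xs equals summing count(v) * f(v) over the distinct values of xs
lemma sum_ofList_count_mul (xs : List Int) (f : Int → Int) :
    ((PySem.Set.ofList xs).map (fun v => (xs.count v : Int) * f v)).sum = (xs.map f).sum := by
  rw [← List.sum_toFinset _ (PySem.Set.nodup_ofList xs)]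
  have hset : (PySem.Set.ofList xs).toFinset = xs.toFinset := by
    ext v; simp [PySem.Set.mem_ofList]
  rw [hset, Finset.sum_list_map_count xs f]
  simp

-- ===== VERDICT (by name: the statement is the Claim_ definition above) =====
theorem part2_spec : Claim_equal_part2 := by
  intro rside lside _
  unfold Spec_part2 part2 part2_alt
  rw [foldA_fst lside rside 0 PySem.Dict.empty (by intro k hk; simp at hk)]
  rw [PySem.Dict.foldl_insert_getD_add_one_eq_counter,
      PySem.Dict.foldl_insert_getD_add_one_eq_counter,
      PySem.Dict.items_counter]
  rw [List.map_map]
  have hfun : ((fun p : Int × Int =>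
          p.1 * p.2 * (PySem.Dict.counter lside).getD p.1 0) ∘
          fun k => (k, (rside.count k : Int)))
       = fun v => (rside.count v : Int) * (v * (lside.count v : Int)) := by
    funext v
    simp only [Function.comp_apply, PySem.Dict.getD_counter]
    ring
  rw [hfun, sum_ofList_count_mul rside (fun i => i * (lside.count i : Int))]
  exact zero_add _
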